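-- pv_equiv track=rewrite | github.com/dantetemplar/competitive-programming | Codeforces - Educational Codeforces Round 183 (Rated for Div. 2)/C_Строка_Монокарпа.py | solve
-- ===== SOURCE A (Python) =====
-- def solve(n: int, s: str) -> int:
--     # a -> +1, b -> -1
--     a = s.count("a")
--     b = n - a
--     D = a - b
--     if D == 0:
--         return 0
--
--     S = 0
--     last = {0: 0}  # prefix sum -> latest index (0..n)
--     ans = n + 1
--
--     for i, c in enumerate(s, 1):  # i = length of prefix
--         S += 1 if c == "a" else -1
--         need = S - D  # want S[j] == need with j < i
--         if need in last:
--             ans = min(ans, i - last[need])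
--         # store latest index to minimize length
--         last[S] = i
--
--     return -1 if ans >= n else ans
-- ===== SOURCE B (Python) =====
-- def solve(n: int, s: str) -> int:
--     m = len(s)
--     pre = [0]
--     for c in s:
--         pre.append(pre[-1] + (1 if c == 'a' else -1))
--     D = 2 * s.count('a') - n
--     if D == 0:
--         return 0
--     best = None
--     for i in range(1, m + 1):
--         j = next((j for j in range(i - 1, -1, -1) if pre[i] - pre[j] == D), None)
--         if j is not None and (best is None or i - j < best):
--             best = i - j
--     return best if best is not None and best < n else -1
-- ===== Notes on version B (the rewrite author's own statement) =====
-- stated objective: alternative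
-- what changed: Replaces A's single hashmap pass (latest index per prefix sum, updated on the fly) by an explicit prefix-sum array scanned with a nested loop: for each right endpoint i it searches j downward from i-1 for the first j with pre[i]-pre[j]==D, tracking the minimum length with an Option instead of an n+1 sentinel.
import Mathlib
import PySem

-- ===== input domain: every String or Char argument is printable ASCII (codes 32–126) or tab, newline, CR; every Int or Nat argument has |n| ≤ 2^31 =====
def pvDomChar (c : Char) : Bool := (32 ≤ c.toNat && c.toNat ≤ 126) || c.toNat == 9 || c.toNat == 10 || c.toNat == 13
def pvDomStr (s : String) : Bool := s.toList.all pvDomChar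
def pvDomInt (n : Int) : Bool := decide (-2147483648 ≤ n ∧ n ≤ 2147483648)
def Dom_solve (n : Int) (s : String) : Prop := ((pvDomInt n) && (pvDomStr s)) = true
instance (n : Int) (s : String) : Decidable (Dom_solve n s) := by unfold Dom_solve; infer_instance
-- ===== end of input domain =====

-- B replaces A's one-pass hashmap of latest prefix-sum indices by a prefix-sum array with a
-- nested quadratic scan (alternative decomposition, not faster).

-- ===== PORT A =====
def solve (n : Int) (s : String) : Int :=
  let a : Int := (PySem.Str.count s "a" : Int)
  let b : Int := n - a
  let D : Int := a - b
  if D = 0 then 0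
  else
    let st := (PySem.List.enumerate s.toList 1).foldl
      (fun (st : Int × PySem.Dict Int Int × Int) ic =>
        let S := st.1 + (if ic.2 = 'a' then 1 else -1)
        let need := S - D
        let ans := match st.2.1.get? need with
          | some j => min st.2.2 (ic.1 - j)
          | none => st.2.2
        (S, st.2.1.insert S ic.1, ans))
      (0, PySem.Dict.ofList [((0 : Int), (0 : Int))], n + 1)
    if st.2.2 ≥ n then -1 else st.2.2

-- ===== PORT B =====
def solve_alt (n : Int) (s : String) : Int :=
  let m : Int := (s.toList.length : Int)
  let pre : List Int := s.toList.foldl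
    (fun pre c => pre ++ [(PySem.List.pyGet? pre (-1)).getD 0 + (if c = 'a' then 1 else -1)]) [0]
  let D : Int := 2 * (PySem.Str.count s "a" : Int) - n
  if D = 0 then 0
  else
    let best : Option Int := (PySem.List.pyRange 1 (m + 1) 1).foldl
      (fun best i =>
        match (PySem.List.pyRange (i - 1) (-1) (-1)).find?
            (fun j => PySem.List.pyGetD pre i 0 - PySem.List.pyGetD pre j 0 == D) with
        | some j =>
          match best with
          | some b => if i - j < b then some (i - j) else some b
          | none => some (i - j)
        | none => best)
      none
    match best with
    | some b => if b < n then b else -1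
    | none => -1

-- ===== PRECONDITION & SPEC =====
def Spec_solve (n : Int) (s : String) (out : Int) : Prop := out = solve_alt n s
instance (n : Int) (s : String) (out : Int) : Decidable (Spec_solve n s out) := by unfold Spec_solve; infer_instance

-- ===== CLAIM (what is proved, stated in full; the proofs are below) =====
def Claim_equal_solve : Prop := ∀ (n : Int) (s : String), Dom_solve n s → Spec_solve n s (solve n s)

-- ===== LEMMAS AND PROOFS =====

/-- a ↦ +1, other ↦ -1. -/
def pvVal (c : Char) : Int := if c = 'a' then 1 else -1

/-- Prefix sum of the whole list. -/
def pvSum (l : List Char) : Int := (l.map pvVal).sum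

/-- Latest j ≤ k with prefix-sum(cs.take j) = v. -/
def pvLast? (cs : List Char) : Nat → Int → Option Nat
  | 0, v => if pvSum (cs.take 0) = v then some 0 else none
  | k + 1, v => if pvSum (cs.take (k + 1)) = v then some (k + 1) else pvLast? cs k v

/-- A's running minimum after processing the first k characters (initial value a0). -/
def pvAns (cs : List Char) (D a0 : Int) : Nat → Int
  | 0 => a0
  | k + 1 =>
    match pvLast? cs k (pvSum (cs.take (k + 1)) - D) with
    | some j => min (pvAns cs D a0 k) (((k : Int) + 1) - (j : Int))
    | none => pvAns cs D a0 k

/-- B's running optional minimum after the first k outer iterations. -/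
def pvBest (cs : List Char) (D : Int) : Nat → Option Int
  | 0 => none
  | k + 1 =>
    match pvLast? cs k (pvSum (cs.take (k + 1)) - D), pvBest cs D k with
    | some j, some b => if ((k : Int) + 1) - (j : Int) < b then some (((k : Int) + 1) - (j : Int)) else some b
    | some j, none => some (((k : Int) + 1) - (j : Int))
    | none, b => b

theorem pvSum_append (q : List Char) (c : Char) :
    pvSum (q ++ [c]) = pvSum q + pvVal c := by
  simp [pvSum]

theorem pvLast?_zero (cs : List Char) (v : Int) :
    pvLast? cs 0 v = if pvSum (cs.take 0) = v then some 0 else none := rfl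

theorem pvLast?_succ (cs : List Char) (k : Nat) (v : Int) :
    pvLast? cs (k + 1) v =
      if pvSum (cs.take (k + 1)) = v then some (k + 1) else pvLast? cs k v := rfl

theorem pvAns_succ (cs : List Char) (D a0 : Int) (k : Nat) :
    pvAns cs D a0 (k + 1) =
      match pvLast? cs k (pvSum (cs.take (k + 1)) - D) with
      | some j => min (pvAns cs D a0 k) (((k : Int) + 1) - (j : Int))
      | none => pvAns cs D a0 k := rfl

theorem pvBest_succ (cs : List Char) (D : Int) (k : Nat) :
    pvBest cs D (k + 1) =
      match pvLast? cs k (pvSum (cs.take (k + 1)) - D), pvBest cs D k with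
      | some j, some b =>
        if ((k : Int) + 1) - (j : Int) < b then some (((k : Int) + 1) - (j : Int)) else some b
      | some j, none => some (((k : Int) + 1) - (j : Int))
      | none, b => b := rfl

theorem pvLast?_append (q : List Char) (c : Char) (k : Nat) (v : Int) (hk : k ≤ q.length) :
    pvLast? (q ++ [c]) k v = pvLast? q k v := by
  induction k with
  | zero => simp [pvLast?]
  | succ k ih =>
    rw [pvLast?_succ, pvLast?_succ, List.take_append_of_le_length hk, ih (by omega)]

theorem pvAns_append (q : List Char) (c : Char) (D a0 : Int) (k : Nat) (hk : k ≤ q.length) :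
    pvAns (q ++ [c]) D a0 k = pvAns q D a0 k := by
  induction k with
  | zero => rfl
  | succ k ih =>
    rw [pvAns_succ, pvAns_succ, List.take_append_of_le_length hk,
      pvLast?_append q c k _ (by omega), ih (by omega)]

theorem pvAns_eq_best (cs : List Char) (D a0 : Int) (k : Nat) :
    pvAns cs D a0 k = match pvBest cs D k with
      | some b => min a0 b
      | none => a0 := by
  induction k with
  | zero => rfl
  | succ k ih =>
    rw [pvAns_succ, pvBest_succ]
    rcases pvLast? cs k (pvSum (cs.take (k + 1)) - D) with _ | j <;> dsimp only
    · exact ih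
    · rcases hB : pvBest cs D k with _ | b <;> simp only [hB] at ih ⊢ <;>
        rw [ih]
      · by_cases h : (((k : Int) + 1) - (j : Int)) < b
        · rw [if_pos h, min_assoc, min_eq_right h.le]
        · rw [if_neg h, min_assoc, min_eq_left (not_lt.mp h)]

-- ===== A-side loop characterisation =====

def pvStepA (D : Int) (st : Int × PySem.Dict Int Int × Int) (ic : Int × Char) :
    Int × PySem.Dict Int Int × Int :=
  let S := st.1 + (if ic.2 = 'a' then 1 else -1)
  let need := S - D
  let ans := match st.2.1.get? need with
    | some j => min st.2.2 (ic.1 - j)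
    | none => st.2.2
  (S, st.2.1.insert S ic.1, ans)

def pvStA (D a0 : Int) (q : List Char) : Int × PySem.Dict Int Int × Int :=
  (PySem.List.enumerate q 1).foldl (pvStepA D) (0, PySem.Dict.ofList [((0 : Int), (0 : Int))], a0)

theorem pvStA_append (D a0 : Int) (q : List Char) (c : Char) :
    pvStA D a0 (q ++ [c]) = pvStepA D (pvStA D a0 q) (1 + (q.length : Int), c) := by
  unfold pvStA
  rw [PySem.List.enumerate_append, List.foldl_append]
  simp [PySem.List.enumerate_cons, PySem.List.enumerate_nil]

theorem pvStA_inv (D a0 : Int) (q : List Char) :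
    (pvStA D a0 q).1 = pvSum q ∧
    (∀ v : Int, (pvStA D a0 q).2.1.get? v
        = Option.map (fun j : Nat => (j : Int)) (pvLast? q q.length v)) ∧
    (pvStA D a0 q).2.2 = pvAns q D a0 q.length := by
  induction q using List.reverseRecOn with
  | nil =>
    refine ⟨rfl, ?_, rfl⟩
    intro v
    show (PySem.Dict.ofList [((0 : Int), (0 : Int))]).get? v = _
    simp only [List.length_nil]
    rw [pvLast?_zero]
    by_cases h : v = 0
    · rw [if_pos (show pvSum ([].take 0) = v from by simp [pvSum, h])]
      subst h
      rfl
    · rw [if_neg (show ¬ pvSum ([].take 0) = v from by simp [pvSum]; omega)]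
      have hb : ((0 : Int) == v) = false := by simp; omega
      simp [PySem.Dict.ofList, PySem.Dict.update, PySem.Dict.get?, PySem.Dict.insert,
        PySem.Dict.empty, hb]
  | append_singleton q c ih =>
    obtain ⟨h1, h2, h3⟩ := ih
    rw [pvStA_append]
    have hS : (pvStA D a0 q).1 + (if c = 'a' then 1 else -1) = pvSum (q ++ [c]) := by
      rw [h1, pvSum_append]; rfl
    have hlen : (q ++ [c]).length = q.length + 1 := by simp
    have htake : (q ++ [c]).take (q.length + 1) = q ++ [c] := by
      rw [← hlen, List.take_length]
    refine ⟨hS, ?_, ?_⟩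
    · intro v
      show ((pvStA D a0 q).2.1.insert ((pvStA D a0 q).1 + (if c = 'a' then 1 else -1))
          (1 + (q.length : Int))).get? v = _
      rw [hS, PySem.Dict.get?_insert, hlen, pvLast?_succ, htake,
        pvLast?_append q c q.length v (le_refl _)]
      by_cases h : v = pvSum (q ++ [c])
      · rw [if_pos h, if_pos h.symm]
        simp only [Option.map_some, Option.some.injEq]
        push_cast
        ring
      · rw [if_neg h, if_neg (fun hh => h hh.symm), h2 v]
    · show (match (pvStA D a0 q).2.1.get?
            ((pvStA D a0 q).1 + (if c = 'a' then 1 else -1) - D) with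
          | some j => min (pvStA D a0 q).2.2 ((1 + (q.length : Int)) - j)
          | none => (pvStA D a0 q).2.2) = _
      rw [hS, h2, h3, hlen, pvAns_succ, htake,
        pvLast?_append q c q.length _ (le_refl _),
        pvAns_append q c D a0 q.length (le_refl _)]
      rcases pvLast? q q.length (pvSum (q ++ [c]) - D) with _ | j
      · simp only [Option.map_none]
      · simp only [Option.map_some]
        congr 1
        ring

-- ===== B-side loop characterisation =====

def pvPre (cs : List Char) : List Int :=
  (List.range (cs.length + 1)).map (fun k => pvSum (cs.take k))

theorem pvPre_append (q : List Char) (c : Char) :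
    pvPre (q ++ [c]) = pvPre q ++ [pvSum (q ++ [c])] := by
  unfold pvPre
  have hlen : (q ++ [c]).length = q.length + 1 := by simp
  rw [hlen, List.range_succ, List.map_append]
  congr 1
  · apply List.map_congr_left
    intro k hk
    have hk' : k < q.length + 1 := List.mem_range.mp hk
    rw [List.take_append_of_le_length (by omega)]
  · simp only [List.map_cons, List.map_nil]
    rw [show (q ++ [c]).take (q.length + 1) = q ++ [c] from by
      rw [← hlen, List.take_length]]

theorem pvGet_last (xs : List Int) (x : Int) :
    PySem.List.pyGet? (xs ++ [x]) (-1) = some x := by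
  simp [PySem.List.pyGet?, PySem.List.pyIdx?]

theorem pvPre_ne_nil (q : List Char) : ∃ ys y, pvPre q = ys ++ [y] ∧ y = pvSum q := by
  rcases q.eq_nil_or_concat with rfl | ⟨r, c, rfl⟩
  · exact ⟨[], 0, rfl, rfl⟩
  · rw [List.concat_eq_append]
    exact ⟨pvPre r, pvSum (r ++ [c]), pvPre_append r c, rfl⟩

theorem pvBuild (q : List Char) :
    q.foldl
      (fun pre c => pre ++ [(PySem.List.pyGet? pre (-1)).getD 0 + (if c = 'a' then 1 else -1)])
      [0] = pvPre q := by
  induction q using List.reverseRecOn with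
  | nil => rfl
  | append_singleton q c ih =>
    rw [List.foldl_append, ih]
    simp only [List.foldl_cons, List.foldl_nil]
    obtain ⟨ys, y, hys, hy⟩ := pvPre_ne_nil q
    rw [hys, pvGet_last, pvPre_append, hys]
    simp only [Option.getD_some, List.append_cancel_left_eq, List.cons.injEq, and_true]
    rw [hy, pvSum_append]
    rfl

theorem pvPre_getD (cs : List Char) (i : Int) (h0 : 0 ≤ i) (h1 : i < (cs.length : Int) + 1) :
    PySem.List.pyGetD (pvPre cs) i 0 = pvSum (cs.take i.toNat) := by
  have hi : i = (i.toNat : Int) := by omega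
  rw [hi, PySem.List.pyGetD_natCast]
  unfold pvPre
  rw [List.getD_eq_getElem?_getD]
  simp only [List.getElem?_map, List.getElem?_range (by omega : i.toNat < cs.length + 1)]
  rfl

theorem pvFind (cs : List Char) (t D : Int) (k : Nat) (hk : k < cs.length + 1) :
    (PySem.List.pyRange (k : Int) (-1) (-1)).find?
        (fun j => t - PySem.List.pyGetD (pvPre cs) j 0 == D)
      = Option.map (fun j : Nat => (j : Int)) (pvLast? cs k (t - D)) := by
  induction k with
  | zero =>
    rw [PySem.List.pyRange_neg_one_cons (by omega),
      PySem.List.pyRange_neg_one_eq_nil (by omega)]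
    have hg : PySem.List.pyGetD (pvPre cs) ((0 : Nat) : Int) 0 = pvSum (cs.take 0) := by
      rw [pvPre_getD cs _ (by omega) (by push_cast; omega)]
      norm_num
    rw [pvLast?_zero]
    by_cases h : pvSum (cs.take 0) = t - D
    · rw [List.find?_cons_of_pos (by simp only [hg, beq_iff_eq]; omega), if_pos h]
      simp
    · rw [List.find?_cons_of_neg (by simp only [hg, beq_iff_eq]; omega), if_neg h]
      simp
  | succ k ih =>
    have hc : ((k + 1 : Nat) : Int) - 1 = (k : Int) := by push_cast; ring_nf
    rw [PySem.List.pyRange_neg_one_cons (by push_cast; omega), hc]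
    have hg : PySem.List.pyGetD (pvPre cs) (((k + 1) : Nat) : Int) 0 = pvSum (cs.take (k + 1)) := by
      rw [pvPre_getD cs _ (by positivity) (by push_cast; omega), Int.toNat_natCast]
    rw [pvLast?_succ]
    by_cases h : pvSum (cs.take (k + 1)) = t - D
    · rw [List.find?_cons_of_pos (by simp only [hg, beq_iff_eq]; omega), if_pos h]
      simp
    · rw [List.find?_cons_of_neg (by simp only [hg, beq_iff_eq]; omega), if_neg h]
      exact ih (by omega)

theorem pvOuter (cs : List Char) (D : Int) (k : Nat) (hk : k ≤ cs.length) :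
    (PySem.List.pyRange 1 ((k : Int) + 1) 1).foldl
      (fun best i =>
        match (PySem.List.pyRange (i - 1) (-1) (-1)).find?
            (fun j => PySem.List.pyGetD (pvPre cs) i 0 - PySem.List.pyGetD (pvPre cs) j 0 == D) with
        | some j =>
          match best with
          | some b => if i - j < b then some (i - j) else some b
          | none => some (i - j)
        | none => best)
      none = pvBest cs D k := by
  induction k with
  | zero =>
    rw [PySem.List.pyRange_one_eq_nil (by omega)]
    rfl
  | succ k ih =>
    have hcast : ((k + 1 : Nat) : Int) + 1 = ((k : Int) + 1) + 1 := by push_cast; ring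
    rw [hcast, PySem.List.pyRange_one_succ_right (by omega), List.foldl_append, ih (by omega)]
    simp only [List.foldl_cons, List.foldl_nil]
    have h1 : ((k : Int) + 1) - 1 = (k : Int) := by ring
    rw [h1, pvFind cs _ D k (by omega)]
    rw [pvPre_getD cs ((k : Int) + 1) (by positivity) (by omega),
      show ((k : Int) + 1).toNat = k + 1 from by omega]
    rw [pvBest_succ]
    rcases pvLast? cs k (pvSum (cs.take (k + 1)) - D) with _ | j <;>
        rcases pvBest cs D k with _ | b <;>
      simp only [Option.map_some, Option.map_none]

theorem solve_eq_ref (n : Int) (s : String) :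
    solve n s =
      (let D := 2 * (PySem.Str.count s "a" : Int) - n
       if D = 0 then 0
       else if pvAns s.toList D (n + 1) s.toList.length ≥ n then -1
       else pvAns s.toList D (n + 1) s.toList.length) := by
  have harith : ((PySem.Str.count s "a" : Int)) - (n - (PySem.Str.count s "a" : Int))
      = 2 * (PySem.Str.count s "a" : Int) - n := by ring
  show (if (PySem.Str.count s "a" : Int) - (n - (PySem.Str.count s "a" : Int)) = 0 then (0 : Int)
      else if (pvStA ((PySem.Str.count s "a" : Int) - (n - (PySem.Str.count s "a" : Int)))
          (n + 1) s.toList).2.2 ≥ n then -1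
      else (pvStA ((PySem.Str.count s "a" : Int) - (n - (PySem.Str.count s "a" : Int)))
          (n + 1) s.toList).2.2) = _
  rw [harith]
  obtain ⟨-, -, h3⟩ := pvStA_inv (2 * (PySem.Str.count s "a" : Int) - n) (n + 1) s.toList
  rw [h3]

theorem solve_alt_eq_ref (n : Int) (s : String) :
    solve_alt n s =
      (let D := 2 * (PySem.Str.count s "a" : Int) - n
       if D = 0 then 0
       else match pvBest s.toList D s.toList.length with
         | some b => if b < n then b else -1
         | none => -1) := by
  unfold solve_alt
  simp only
  rw [pvBuild s.toList,
    pvOuter s.toList (2 * (PySem.Str.count s "a" : Int) - n) s.toList.length (le_refl _)]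

theorem pvFinal (n b : Int) :
    (if min (n + 1) b ≥ n then (-1 : Int) else min (n + 1) b) = (if b < n then b else -1) := by
  rcases le_total (n + 1) b with hb | hb
  · rw [min_eq_left hb]
    split_ifs <;> omega
  · rw [min_eq_right hb]
    split_ifs <;> omega

theorem solve_spec : Claim_equal_solve := by
  intro n s hdom
  clear hdom
  show solve n s = solve_alt n s
  rw [solve_eq_ref, solve_alt_eq_ref]
  simp only
  by_cases hD : 2 * (PySem.Str.count s "a" : Int) - n = 0
  · rw [if_pos hD, if_pos hD]
  · rw [if_neg hD, if_neg hD, pvAns_eq_best]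
    rcases h : pvBest s.toList (2 * (PySem.Str.count s "a" : Int) - n) s.toList.length with _ | b
    · dsimp only
      have hge : n + 1 ≥ n := by omega
      rw [if_pos hge]
    · dsimp only
      exact pvFinal n b
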